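-- pv_equiv track=rewrite | github.com/sudiptap/algods | ds_algo/patterns/dynamic_programming/02_knapsack_01/solutions/2431-maximize-total-tastiness-of-purchased-fruits.py | maxTastiness
-- ===== SOURCE A (Python) =====
-- from typing import List
--
-- def maxTastiness(price: List[int], tastiness: List[int], maxAmount: int, maxCoupons: int) -> int:
--     n = len(price)
--     # dp[j][k] = max tastiness with budget j and k coupons
--     dp = [[0] * (maxCoupons + 1) for _ in range(maxAmount + 1)]
--
--     for i in range(n):
--         p = price[i]
--         t = tastiness[i]
--         half_p = p // 2
--
--         # Process in reverse for 0/1 knapsack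
--         for j in range(maxAmount, -1, -1):
--             for k in range(maxCoupons, -1, -1):
--                 # Buy without coupon
--                 if j >= p:
--                     dp[j][k] = max(dp[j][k], dp[j - p][k] + t)
--                 # Buy with coupon
--                 if k > 0 and j >= half_p:
--                     dp[j][k] = max(dp[j][k], dp[j - half_p][k - 1] + t)
--
--     return dp[maxAmount][maxCoupons]
-- ===== SOURCE B (Python) =====
-- from typing import List
--
-- def maxTastiness(price: List[int], tastiness: List[int], maxAmount: int, maxCoupons: int) -> int:
--     # Top-down memoized recursion over items instead of a bottom-up 3D table sweep.
--     n = len(price)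
--     memo = {}
--
--     def solve(i: int, budget: int, coupons: int) -> int:
--         if i == n:
--             return 0
--         key = (i, budget, coupons)
--         if key in memo:
--             return memo[key]
--         p = price[i]
--         t = tastiness[i]
--         best = solve(i + 1, budget, coupons)          # skip item i
--         if budget >= p:                               # buy at full price
--             best = max(best, t + solve(i + 1, budget - p, coupons))
--         if coupons > 0 and budget >= p // 2:          # buy with a coupon
--             best = max(best, t + solve(i + 1, budget - p // 2, coupons - 1))
--         memo[key] = best
--         return best
--
--     return solve(0, maxAmount, maxCoupons)
-- ===== Notes on version B (the rewrite author's own statement) =====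
-- stated objective: faster
-- what changed: Replaces the bottom-up in-place (budget x coupons) table swept once per every item with a top-down memoized recursion solve(i, budget, coupons) over the items, which only ever evaluates states reachable from (0, maxAmount, maxCoupons).
import Mathlib
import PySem

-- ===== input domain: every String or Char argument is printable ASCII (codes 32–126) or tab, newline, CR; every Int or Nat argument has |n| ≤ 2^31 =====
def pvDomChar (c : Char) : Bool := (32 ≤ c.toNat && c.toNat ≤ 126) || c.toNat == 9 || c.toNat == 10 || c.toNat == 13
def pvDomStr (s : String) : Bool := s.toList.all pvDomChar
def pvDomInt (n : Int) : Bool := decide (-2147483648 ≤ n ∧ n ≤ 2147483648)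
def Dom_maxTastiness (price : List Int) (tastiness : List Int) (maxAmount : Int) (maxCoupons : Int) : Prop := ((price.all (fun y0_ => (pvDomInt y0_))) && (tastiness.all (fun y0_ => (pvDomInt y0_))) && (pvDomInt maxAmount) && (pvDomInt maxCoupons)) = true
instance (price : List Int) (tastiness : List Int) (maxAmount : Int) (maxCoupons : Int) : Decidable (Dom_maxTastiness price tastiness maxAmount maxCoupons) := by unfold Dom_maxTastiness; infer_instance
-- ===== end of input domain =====

-- B replaces A's bottom-up in-place (budget × coupons) table sweep per item by a top-down
-- recursion solve(i, budget, coupons) over the items (memoized in Python; the memo dict is a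
-- cache only and is dropped in the Lean port, which computes the same recursion).

-- ===== PORT A =====
-- dp[j][k] read / write with Python indexing; all indices are in range under Pre_.
def pvGet2 (d : List (List Int)) (j k : Int) : Int :=
  PySem.List.pyGetD (PySem.List.pyGetD d j []) k 0

def pvSet2 (d : List (List Int)) (j k : Int) (v : Int) : List (List Int) :=
  PySem.List.pySetD d j (PySem.List.pySetD (PySem.List.pyGetD d j []) k v)

-- body of the two inner loops: 'if j >= p: …' then 'if k > 0 and j >= half_p: …'
def pvCell (p t halfP : Int) (dp : List (List Int)) (j k : Int) : List (List Int) :=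
  let dp := if j ≥ p then pvSet2 dp j k (max (pvGet2 dp j k) (pvGet2 dp (j - p) k + t)) else dp
  let dp := if k > 0 ∧ j ≥ halfP then pvSet2 dp j k (max (pvGet2 dp j k) (pvGet2 dp (j - halfP) (k - 1) + t)) else dp
  dp

def maxTastiness (price : List Int) (tastiness : List Int) (maxAmount : Int) (maxCoupons : Int) : Int :=
  let n : Int := price.length
  let dp : List (List Int) :=
    (PySem.List.pyRange 0 (maxAmount + 1) 1).map
      (fun _ => List.replicate (maxCoupons + 1).toNat (0 : Int))
  let dp :=
    (PySem.List.pyRange 0 n 1).foldl (fun dp i =>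
      let p := PySem.List.pyGetD price i 0
      let t := PySem.List.pyGetD tastiness i 0
      let halfP := PySem.Int.floordiv p 2
      (PySem.List.pyRange maxAmount (-1) (-1)).foldl (fun dp j =>
        (PySem.List.pyRange maxCoupons (-1) (-1)).foldl (fun dp k =>
          pvCell p t halfP dp j k) dp) dp) dp
  pvGet2 dp maxAmount maxCoupons

-- ===== PORT B =====
-- Source B's solve(i, budget, coupons) recurses on i reading price[i]/tastiness[i]; ported as
-- structural recursion on the zipped (price, tastiness) pairs (exact under Pre_, where
-- len price ≤ len tastiness, so the zip has exactly n = len price items).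
def pvSolve : List (Int × Int) → Int → Int → Int
  | [], _, _ => 0
  | (p, t) :: rest, budget, coupons =>
    let best := pvSolve rest budget coupons
    let best := if budget ≥ p then max best (t + pvSolve rest (budget - p) coupons) else best
    let best := if coupons > 0 ∧ budget ≥ PySem.Int.floordiv p 2 then
        max best (t + pvSolve rest (budget - PySem.Int.floordiv p 2) (coupons - 1)) else best
    best

def maxTastiness_alt (price : List Int) (tastiness : List Int) (maxAmount : Int) (maxCoupons : Int) : Int :=
  pvSolve (price.zip tastiness) maxAmount maxCoupons

-- ===== PRECONDITION & SPEC =====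
-- Pre_ is exactly where the Python A returns normally: A raises IndexError when maxAmount < 0 or
-- maxCoupons < 0 (it indexes an empty dp row/column), when tastiness is shorter than price
-- (tastiness[i] out of range), or when some price is negative (dp[j - p] is past the end).
def Pre_maxTastiness (price : List Int) (tastiness : List Int) (maxAmount : Int) (maxCoupons : Int) : Prop :=
  0 ≤ maxAmount ∧ 0 ≤ maxCoupons ∧ price.length ≤ tastiness.length ∧ ∀ p ∈ price, 0 ≤ p
instance (price : List Int) (tastiness : List Int) (maxAmount : Int) (maxCoupons : Int) : Decidable (Pre_maxTastiness price tastiness maxAmount maxCoupons) := by unfold Pre_maxTastiness; infer_instance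

def pvWitness_maxTastiness : List Int × List Int × Int × Int := ([3, 1, 4], [4, 2, 6], 5, 1)

def Spec_maxTastiness (price : List Int) (tastiness : List Int) (maxAmount : Int) (maxCoupons : Int) (out : Int) : Prop := out = maxTastiness_alt price tastiness maxAmount maxCoupons
instance (price : List Int) (tastiness : List Int) (maxAmount : Int) (maxCoupons : Int) (out : Int) : Decidable (Spec_maxTastiness price tastiness maxAmount maxCoupons out) := by unfold Spec_maxTastiness; infer_instance

-- ===== CLAIM (what is proved, stated in full; the proofs are below) =====
def Claim_equal_maxTastiness : Prop := ∀ (price : List Int) (tastiness : List Int) (maxAmount : Int) (maxCoupons : Int), Dom_maxTastiness price tastiness maxAmount maxCoupons → Pre_maxTastiness price tastiness maxAmount maxCoupons → Spec_maxTastiness price tastiness maxAmount maxCoupons (maxTastiness price tastiness maxAmount maxCoupons)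
-- ===== LEMMAS AND PROOFS =====
-- Proof plan: Fstep is the "process one item" functional on value tables g : budget → coupons →
-- value; B's recursion peels items off the FRONT (pvSolve_cons) while A's forward item loop
-- appends them at the BACK (pvSolve_snoc); the two meet through the commutation F_comm, which
-- holds because taking two items in either order imposes the same budget/coupon constraints when
-- prices are nonnegative. pvCellstep/pvKpass/pvJpass show that A's in-place reverse sweep over
-- one item computes exactly Fstep of the old table, and pvItemfold folds that over the items.

def Fstep (g : Int → Int → Int) (p t : Int) (j k : Int) : Int :=
  let best := g j k
  let best := if j ≥ p then max best (t + g (j - p) k) else best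
  let best := if k > 0 ∧ j ≥ PySem.Int.floordiv p 2 then
      max best (t + g (j - PySem.Int.floordiv p 2) (k - 1)) else best
  best

theorem pvHalf_nonneg {p : Int} (hp : 0 ≤ p) : 0 ≤ PySem.Int.floordiv p 2 := by
  rw [PySem.Int.floordiv_eq_ediv_of_pos (by omega)]
  exact Int.ediv_nonneg hp (by omega)

theorem Fstep_eq (g : Int → Int → Int) (p t j k : Int) : Fstep g p t j k =
    max (g j k) (max (if p ≤ j then t + g (j - p) k else g j k)
      (if 0 < k ∧ PySem.Int.floordiv p 2 ≤ j then
        t + g (j - PySem.Int.floordiv p 2) (k - 1) else g j k)) := by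
  unfold Fstep; dsimp only
  by_cases hA : p ≤ j <;> by_cases hB : 0 < k ∧ PySem.Int.floordiv p 2 ≤ j <;>
    simp only [ge_iff_le, gt_iff_lt, hA, hB, if_true, if_false, and_self, and_true, true_and, reduceIte] <;> omega

theorem le_Fstep_self (g : Int → Int → Int) (p t j k : Int) : g j k ≤ Fstep g p t j k := by
  rw [Fstep_eq]; omega

theorem le_Fstep_full {g : Int → Int → Int} {p t j k a : Int} (h : p ≤ j) (ha : a = j - p) :
    t + g a k ≤ Fstep g p t j k := by
  subst ha; rw [Fstep_eq, if_pos h]; omega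

theorem le_Fstep_coupon {g : Int → Int → Int} {p t j k a b : Int} (h1 : 0 < k)
    (h2 : PySem.Int.floordiv p 2 ≤ j) (ha : a = j - PySem.Int.floordiv p 2) (hb : b = k - 1) :
    t + g a b ≤ Fstep g p t j k := by
  subst ha; subst hb; rw [Fstep_eq]
  have hB : 0 < k ∧ PySem.Int.floordiv p 2 ≤ j := ⟨h1, h2⟩
  rw [if_pos hB]; omega

theorem Fstep_le {g : Int → Int → Int} {p t j k M : Int} (h0 : g j k ≤ M)
    (h1 : p ≤ j → t + g (j - p) k ≤ M)
    (h2 : 0 < k → PySem.Int.floordiv p 2 ≤ j → t + g (j - PySem.Int.floordiv p 2) (k - 1) ≤ M) :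
    Fstep g p t j k ≤ M := by
  rw [Fstep_eq]
  by_cases hA : p ≤ j <;> by_cases hB : 0 < k ∧ PySem.Int.floordiv p 2 ≤ j <;>
    simp only [hA, hB, if_true, if_false, and_self, and_true, true_and,
      iff_true, iff_false, reduceIte]
  · have := h1 hA; have := h2 hB.1 hB.2; omega
  · have := h1 hA; omega
  · have := h2 hB.1 hB.2; omega
  · omega

theorem F_comm_le (g : Int → Int → Int) {p q : Int} (t s : Int) (hp : 0 ≤ p) (hq : 0 ≤ q)
    (j k : Int) :
    Fstep (fun a b => Fstep g p t a b) q s j k ≤ Fstep (fun a b => Fstep g q s a b) p t j k := by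
  have hfp : 0 ≤ PySem.Int.floordiv p 2 := pvHalf_nonneg hp
  have hfq : 0 ≤ PySem.Int.floordiv q 2 := pvHalf_nonneg hq
  apply Fstep_le
  · -- skip item (q,s): Fstep g p t j k ≤ RHS
    apply Fstep_le
    · calc g j k ≤ Fstep g q s j k := le_Fstep_self g q s j k
        _ ≤ Fstep (fun a b => Fstep g q s a b) p t j k := le_Fstep_self _ p t j k
    · intro hA
      have u1 : g (j - p) k ≤ Fstep g q s (j - p) k := le_Fstep_self g q s (j - p) k
      have u2 : t + Fstep g q s (j - p) k ≤ Fstep (fun a b => Fstep g q s a b) p t j k :=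
        le_Fstep_full hA rfl
      omega
    · intro h1 h2
      have u1 : g (j - PySem.Int.floordiv p 2) (k - 1)
          ≤ Fstep g q s (j - PySem.Int.floordiv p 2) (k - 1) := le_Fstep_self g q s _ _
      have u2 : t + Fstep g q s (j - PySem.Int.floordiv p 2) (k - 1)
          ≤ Fstep (fun a b => Fstep g q s a b) p t j k := le_Fstep_coupon h1 h2 rfl rfl
      omega
  · -- take (q,s) at full price
    intro hqj
    have hgoal : Fstep g p t (j - q) k ≤ Fstep (fun a b => Fstep g q s a b) p t j k - s := by
      apply Fstep_le
      · have u1 : s + g (j - q) k ≤ Fstep g q s j k := le_Fstep_full hqj rfl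
        have u2 : Fstep g q s j k ≤ Fstep (fun a b => Fstep g q s a b) p t j k :=
          le_Fstep_self _ p t j k
        omega
      · intro hpj
        have u1 : s + g (j - q - p) k ≤ Fstep g q s (j - p) k :=
          le_Fstep_full (by omega) (by ring)
        have u2 : t + Fstep g q s (j - p) k ≤ Fstep (fun a b => Fstep g q s a b) p t j k :=
          le_Fstep_full (by omega) rfl
        omega
      · intro h1 h2
        have u1 : s + g (j - q - PySem.Int.floordiv p 2) (k - 1)
            ≤ Fstep g q s (j - PySem.Int.floordiv p 2) (k - 1) :=
          le_Fstep_full (by omega) (by ring)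
        have u2 : t + Fstep g q s (j - PySem.Int.floordiv p 2) (k - 1)
            ≤ Fstep (fun a b => Fstep g q s a b) p t j k := le_Fstep_coupon h1 (by omega) rfl rfl
        omega
    omega
  · -- take (q,s) with a coupon
    intro hk hfqj
    have hgoal : Fstep g p t (j - PySem.Int.floordiv q 2) (k - 1)
        ≤ Fstep (fun a b => Fstep g q s a b) p t j k - s := by
      apply Fstep_le
      · have u1 : s + g (j - PySem.Int.floordiv q 2) (k - 1) ≤ Fstep g q s j k :=
          le_Fstep_coupon hk hfqj rfl rfl
        have u2 : Fstep g q s j k ≤ Fstep (fun a b => Fstep g q s a b) p t j k :=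
          le_Fstep_self _ p t j k
        omega
      · intro hpj
        have u1 : s + g (j - PySem.Int.floordiv q 2 - p) (k - 1) ≤ Fstep g q s (j - p) k :=
          le_Fstep_coupon hk (by omega) (by ring) rfl
        have u2 : t + Fstep g q s (j - p) k ≤ Fstep (fun a b => Fstep g q s a b) p t j k :=
          le_Fstep_full (by omega) rfl
        omega
      · intro h1 h2
        have u1 : s + g (j - PySem.Int.floordiv q 2 - PySem.Int.floordiv p 2) (k - 1 - 1)
            ≤ Fstep g q s (j - PySem.Int.floordiv p 2) (k - 1) :=
          le_Fstep_coupon h1 (by omega) (by ring) rfl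
        have u2 : t + Fstep g q s (j - PySem.Int.floordiv p 2) (k - 1)
            ≤ Fstep (fun a b => Fstep g q s a b) p t j k := le_Fstep_coupon hk (by omega) rfl rfl
        omega
    omega

theorem F_comm (g : Int → Int → Int) {p q : Int} (t s : Int) (hp : 0 ≤ p) (hq : 0 ≤ q)
    (j k : Int) :
    Fstep (fun a b => Fstep g p t a b) q s j k = Fstep (fun a b => Fstep g q s a b) p t j k :=
  le_antisymm (F_comm_le g t s hp hq j k) (F_comm_le g s t hq hp j k)

theorem Fstep_congr {g g' : Int → Int → Int} (p t j k : Int)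
    (h : ∀ a b, g a b = g' a b) : Fstep g p t j k = Fstep g' p t j k := by
  unfold Fstep; dsimp only; simp only [h]

theorem pvSolve_snoc (l : List (Int × Int)) (p t : Int) (hl : ∀ x ∈ l, 0 ≤ x.1) (hp : 0 ≤ p)
    (j k : Int) :
    pvSolve (l ++ [(p, t)]) j k = Fstep (fun a b => pvSolve l a b) p t j k := by
  induction l generalizing j k with
  | nil => rfl
  | cons x l ih =>
    obtain ⟨q, s⟩ := x
    have hq : 0 ≤ q := hl (q, s) List.mem_cons_self
    have hl' : ∀ y ∈ l, 0 ≤ y.1 := fun y hy => hl y (List.mem_cons_of_mem _ hy)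
    show Fstep (fun a b => pvSolve (l ++ [(p, t)]) a b) q s j k
        = Fstep (fun a b => Fstep (fun a b => pvSolve l a b) q s a b) p t j k
    rw [Fstep_congr q s j k (fun a b => ih hl' a b)]
    exact F_comm (fun a b => pvSolve l a b) t s hp hq j k

def pvDims (d : List (List Int)) (R C : Nat) : Prop :=
  d.length = R ∧ ∀ r ∈ d, r.length = C

theorem pvGet2_nonneg (d : List (List Int)) {j k : Int} (hj : 0 ≤ j) (hk : 0 ≤ k) :
    pvGet2 d j k = (d.getD j.toNat []).getD k.toNat 0 := by
  unfold pvGet2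
  rw [PySem.List.pyGetD_of_nonneg d [] hj, PySem.List.pyGetD_of_nonneg _ 0 hk]

theorem pvSet2_eq (d : List (List Int)) {j k : Int} (v : Int) (hj : 0 ≤ j) (hk : 0 ≤ k) :
    pvSet2 d j k v = d.set j.toNat ((d.getD j.toNat []).set k.toNat v) := by
  unfold pvSet2
  rw [PySem.List.pyGetD_of_nonneg d [] hj, PySem.List.pySetD_of_nonneg _ _ hk,
    PySem.List.pySetD_of_nonneg _ _ hj]

theorem pvDims_set2 {d : List (List Int)} {R C : Nat} (hd : pvDims d R C) {j k : Int} (v : Int)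
    (hj : 0 ≤ j) (hk : 0 ≤ k) : pvDims (pvSet2 d j k v) R C := by
  rw [pvSet2_eq d v hj hk]
  obtain ⟨h1, h2⟩ := hd
  by_cases hjl : j.toNat < d.length
  · refine ⟨by simp [h1], ?_⟩
    intro r hr
    rcases List.mem_or_eq_of_mem_set hr with h | rfl
    · exact h2 r h
    · rw [List.length_set, List.getD_eq_getElem d [] hjl]
      exact h2 _ (List.getElem_mem hjl)
  · rw [List.set_eq_of_length_le (by omega)]
    exact ⟨h1, h2⟩

theorem pvGet2_set2_self {d : List (List Int)} {R C : Nat} (hd : pvDims d R C) {j k : Int}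
    (v : Int) (hj : 0 ≤ j) (hk : 0 ≤ k) (hjR : j.toNat < R) (hkC : k.toNat < C) :
    pvGet2 (pvSet2 d j k v) j k = v := by
  obtain ⟨h1, h2⟩ := hd
  have hjl : j.toNat < d.length := by omega
  have hrowlen : (d.getD j.toNat []).length = C := by
    rw [List.getD_eq_getElem d [] hjl]
    exact h2 _ (List.getElem_mem hjl)
  rw [pvSet2_eq d v hj hk, pvGet2_nonneg _ hj hk]
  have e1 : (d.set j.toNat ((d.getD j.toNat []).set k.toNat v)).getD j.toNat []
      = (d.getD j.toNat []).set k.toNat v := by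
    rw [List.getD_eq_getElem _ _ (by simpa using hjl)]
    exact List.getElem_set_self (by simpa using hjl)
  rw [e1, List.getD_eq_getElem _ _ (by rw [List.length_set, hrowlen]; omega)]
  exact List.getElem_set_self (by rw [List.length_set, hrowlen]; omega)

theorem pvGet2_set2_ne {d : List (List Int)} {j k j' k' : Int} (v : Int)
    (hj : 0 ≤ j) (hk : 0 ≤ k) (hj' : 0 ≤ j') (hk' : 0 ≤ k')
    (hne : j ≠ j' ∨ k ≠ k') : pvGet2 (pvSet2 d j k v) j' k' = pvGet2 d j' k' := by
  rw [pvSet2_eq d v hj hk, pvGet2_nonneg _ hj' hk', pvGet2_nonneg _ hj' hk']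
  by_cases hjj : j.toNat = j'.toNat
  · have hkk : k.toNat ≠ k'.toNat := by omega
    by_cases hjl : j'.toNat < d.length
    · have e1 : (d.set j.toNat ((d.getD j.toNat []).set k.toNat v)).getD j'.toNat []
          = (d.getD j.toNat []).set k.toNat v := by
        rw [← hjj, List.getD_eq_getElem _ _ (by simp; omega)]
        exact List.getElem_set_self (by simp; omega)
      rw [e1, hjj]
      simp [List.getD_eq_getElem?_getD, List.getElem?_set_ne hkk]
    · have e1 : (d.set j.toNat ((d.getD j.toNat []).set k.toNat v)).getD j'.toNat [] = [] := by
        rw [List.getD_eq_getElem?_getD, List.getElem?_eq_none (by simp; omega), Option.getD_none]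
      have e2 : d.getD j'.toNat [] = [] := by
        rw [List.getD_eq_getElem?_getD, List.getElem?_eq_none (by omega), Option.getD_none]
      rw [e1, e2]
  · have e1 : (d.set j.toNat ((d.getD j.toNat []).set k.toNat v)).getD j'.toNat []
        = d.getD j'.toNat [] := by
      simp [List.getD_eq_getElem?_getD, List.getElem?_set_ne hjj]
    rw [e1]

theorem pvCellstep {R C : Nat} {A Cb : Int} (hR : R = (A + 1).toNat) (hC : C = (Cb + 1).toNat)
    {p t : Int} (hp : 0 ≤ p) (g0 : Int → Int → Int) {d : List (List Int)} {j k : Int}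
    (hd : pvDims d R C) (hj0 : 0 ≤ j) (hjA : j ≤ A) (hk0 : 0 ≤ k) (hkC : k ≤ Cb)
    (hread : ∀ a b, 0 ≤ a → 0 ≤ b → b ≤ Cb → (a < j ∨ (a = j ∧ b ≤ k)) → pvGet2 d a b = g0 a b) :
    pvDims (pvCell p t (PySem.Int.floordiv p 2) d j k) R C ∧
    (∀ a b, 0 ≤ a → 0 ≤ b → ¬(a = j ∧ b = k) →
      pvGet2 (pvCell p t (PySem.Int.floordiv p 2) d j k) a b = pvGet2 d a b) ∧
    pvGet2 (pvCell p t (PySem.Int.floordiv p 2) d j k) j k = Fstep g0 p t j k := by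
  have hfp : 0 ≤ PySem.Int.floordiv p 2 := pvHalf_nonneg hp
  have hjR : j.toNat < R := by omega
  have hkC' : k.toNat < C := by omega
  have e0 : pvGet2 d j k = g0 j k := hread j k hj0 hk0 hkC (by omega)
  unfold pvCell Fstep
  dsimp only
  by_cases h1 : j ≥ p <;> by_cases h2 : k > 0 ∧ j ≥ PySem.Int.floordiv p 2
  · simp only [if_pos h1, if_pos h2]
    have efull : pvGet2 d (j - p) k = g0 (j - p) k := hread _ _ (by omega) hk0 hkC (by omega)
    have ecoup : pvGet2 d (j - PySem.Int.floordiv p 2) (k - 1)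
        = g0 (j - PySem.Int.floordiv p 2) (k - 1) :=
      hread _ _ (by omega) (by omega) (by omega) (by omega)
    have hd1 : pvDims (pvSet2 d j k (max (pvGet2 d j k) (pvGet2 d (j - p) k + t))) R C :=
      pvDims_set2 hd _ hj0 hk0
    have r1 : pvGet2 (pvSet2 d j k (max (pvGet2 d j k) (pvGet2 d (j - p) k + t))) j k
        = max (pvGet2 d j k) (pvGet2 d (j - p) k + t) :=
      pvGet2_set2_self hd _ hj0 hk0 hjR hkC'
    have r2 : pvGet2 (pvSet2 d j k (max (pvGet2 d j k) (pvGet2 d (j - p) k + t)))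
          (j - PySem.Int.floordiv p 2) (k - 1)
        = pvGet2 d (j - PySem.Int.floordiv p 2) (k - 1) :=
      pvGet2_set2_ne _ hj0 hk0 (by omega) (by omega) (by omega)
    refine ⟨pvDims_set2 hd1 _ hj0 hk0, ?_, ?_⟩
    · intro a b ha hb hne
      rw [pvGet2_set2_ne _ hj0 hk0 ha hb (by omega), pvGet2_set2_ne _ hj0 hk0 ha hb (by omega)]
    · rw [pvGet2_set2_self hd1 _ hj0 hk0 hjR hkC', r1, r2, e0, efull, ecoup]
      omega
  · simp only [if_pos h1, if_neg h2]
    have efull : pvGet2 d (j - p) k = g0 (j - p) k := hread _ _ (by omega) hk0 hkC (by omega)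
    refine ⟨pvDims_set2 hd _ hj0 hk0, ?_, ?_⟩
    · intro a b ha hb hne
      rw [pvGet2_set2_ne _ hj0 hk0 ha hb (by omega)]
    · rw [pvGet2_set2_self hd _ hj0 hk0 hjR hkC', e0, efull]
      omega
  · simp only [if_neg h1, if_pos h2]
    have ecoup : pvGet2 d (j - PySem.Int.floordiv p 2) (k - 1)
        = g0 (j - PySem.Int.floordiv p 2) (k - 1) :=
      hread _ _ (by omega) (by omega) (by omega) (by omega)
    refine ⟨pvDims_set2 hd _ hj0 hk0, ?_, ?_⟩
    · intro a b ha hb hne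
      rw [pvGet2_set2_ne _ hj0 hk0 ha hb (by omega)]
    · rw [pvGet2_set2_self hd _ hj0 hk0 hjR hkC', e0, ecoup]
      omega
  · simp only [if_neg h1, if_neg h2]
    refine ⟨hd, ?_, ?_⟩
    · intro a b _ _ _
      first | rfl | exact trivial
    · rw [e0]

theorem pvKpass {R C : Nat} {A Cb : Int} (hR : R = (A + 1).toNat) (hC : C = (Cb + 1).toNat)
    {p t : Int} (hp : 0 ≤ p) (g0 : Int → Int → Int) {j : Int} (hj0 : 0 ≤ j) (hjA : j ≤ A) :
    ∀ (m : Nat) (k : Int), k = (m : Int) - 1 → k ≤ Cb →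
    ∀ d : List (List Int), pvDims d R C →
    (∀ a b, 0 ≤ a → 0 ≤ b → b ≤ Cb → (a < j ∨ (a = j ∧ b ≤ k)) → pvGet2 d a b = g0 a b) →
    (∀ b, k < b → b ≤ Cb → pvGet2 d j b = Fstep g0 p t j b) →
    pvDims ((PySem.List.pyRange k (-1) (-1)).foldl
      (fun dp k' => pvCell p t (PySem.Int.floordiv p 2) dp j k') d) R C ∧
    (∀ a b, 0 ≤ a → 0 ≤ b → a ≠ j →
      pvGet2 ((PySem.List.pyRange k (-1) (-1)).foldl
        (fun dp k' => pvCell p t (PySem.Int.floordiv p 2) dp j k') d) a b = pvGet2 d a b) ∧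
    (∀ b, 0 ≤ b → b ≤ Cb →
      pvGet2 ((PySem.List.pyRange k (-1) (-1)).foldl
        (fun dp k' => pvCell p t (PySem.Int.floordiv p 2) dp j k') d) j b = Fstep g0 p t j b) := by
  intro m
  induction m with
  | zero =>
    intro k hk hkC d hd hread habove
    rw [PySem.List.pyRange_neg_one_eq_nil (by omega)]
    simp only [List.foldl_nil]
    refine ⟨hd, ?_, fun b hb hbC => habove b (by omega) hbC⟩
    intro a b _ _ _
    first | rfl | exact trivial
  | succ n ih =>
    intro k hk hkC d hd hread habove
    have hk0 : 0 ≤ k := by omega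
    rw [PySem.List.pyRange_neg_one_cons (by omega)]
    simp only [List.foldl_cons]
    obtain ⟨cd, cu, cv⟩ := pvCellstep hR hC hp g0 hd hj0 hjA hk0 hkC hread
    have hread' : ∀ a b, 0 ≤ a → 0 ≤ b → b ≤ Cb → (a < j ∨ (a = j ∧ b ≤ k - 1)) →
        pvGet2 (pvCell p t (PySem.Int.floordiv p 2) d j k) a b = g0 a b := by
      intro a b ha hb hbC hcond
      rw [cu a b ha hb (by omega)]
      exact hread a b ha hb hbC (by omega)
    have habove' : ∀ b, k - 1 < b → b ≤ Cb →
        pvGet2 (pvCell p t (PySem.Int.floordiv p 2) d j k) j b = Fstep g0 p t j b := by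
      intro b hb hbC
      by_cases hbk : b = k
      · rw [hbk]; exact cv
      · rw [cu j b hj0 (by omega) (by omega)]
        exact habove b (by omega) hbC
    obtain ⟨rd, ru, rv⟩ := ih (k - 1) (by omega) (by omega) _ cd hread' habove'
    refine ⟨rd, ?_, rv⟩
    intro a b ha hb hne
    rw [ru a b ha hb hne, cu a b ha hb (by omega)]

theorem pvJpass {R C : Nat} {A Cb : Int} (hR : R = (A + 1).toNat) (hC : C = (Cb + 1).toNat)
    (hCb : 0 ≤ Cb) {p t : Int} (hp : 0 ≤ p) (g0 : Int → Int → Int) :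
    ∀ (m : Nat) (j : Int), j = (m : Int) - 1 → j ≤ A →
    ∀ d : List (List Int), pvDims d R C →
    (∀ a b, 0 ≤ a → 0 ≤ b → a ≤ j → b ≤ Cb → pvGet2 d a b = g0 a b) →
    (∀ a b, j < a → a ≤ A → 0 ≤ b → b ≤ Cb → pvGet2 d a b = Fstep g0 p t a b) →
    pvDims ((PySem.List.pyRange j (-1) (-1)).foldl
      (fun dp j' => (PySem.List.pyRange Cb (-1) (-1)).foldl
        (fun dp k => pvCell p t (PySem.Int.floordiv p 2) dp j' k) dp) d) R C ∧
    (∀ a b, 0 ≤ a → a ≤ A → 0 ≤ b → b ≤ Cb →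
      pvGet2 ((PySem.List.pyRange j (-1) (-1)).foldl
        (fun dp j' => (PySem.List.pyRange Cb (-1) (-1)).foldl
          (fun dp k => pvCell p t (PySem.Int.floordiv p 2) dp j' k) dp) d) a b
        = Fstep g0 p t a b) := by
  intro m
  induction m with
  | zero =>
    intro j hj hjA d hd hlow hhigh
    rw [show PySem.List.pyRange j (-1) (-1) = [] from PySem.List.pyRange_neg_one_eq_nil (by omega)]
    simp only [List.foldl_nil]
    exact ⟨hd, fun a b ha haA hb hbC => hhigh a b (by omega) haA hb hbC⟩
  | succ n ih =>
    intro j hj hjA d hd hlow hhigh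
    have hj0 : 0 ≤ j := by omega
    rw [show PySem.List.pyRange j (-1) (-1) = j :: PySem.List.pyRange (j - 1) (-1) (-1) from PySem.List.pyRange_neg_one_cons (by omega)]
    simp only [List.foldl_cons]
    obtain ⟨rd, ru, rv⟩ := pvKpass hR hC hp g0 hj0 hjA ((Cb + 1).toNat) Cb (by omega) le_rfl d hd
      (fun a b ha hb hbC hcond => hlow a b ha hb (by omega) hbC)
      (fun b hb hbC => absurd hb (by omega))
    obtain ⟨fd, fv⟩ := ih (j - 1) (by omega) (by omega) _ rd
      (fun a b ha hb haj hbC => by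
        rw [ru a b ha hb (by omega)]
        exact hlow a b ha hb (by omega) hbC)
      (fun a b haj haA hb hbC => by
        by_cases haj' : a = j
        · subst haj'; exact rv b hb hbC
        · rw [ru a b (by omega) hb (by omega)]
          exact hhigh a b (by omega) haA hb hbC)
    exact ⟨fd, fv⟩

theorem pvItemfold {R C : Nat} {A Cb : Int} (hR : R = (A + 1).toNat) (hC : C = (Cb + 1).toNat)
    (hA : 0 ≤ A) (hCb : 0 ≤ Cb) :
    ∀ (l m : List (Int × Int)) (d : List (List Int)), pvDims d R C →
    (∀ x ∈ l, 0 ≤ x.1) → (∀ x ∈ m, 0 ≤ x.1) →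
    (∀ a b, 0 ≤ a → a ≤ A → 0 ≤ b → b ≤ Cb → pvGet2 d a b = pvSolve m a b) →
    (∀ a b, 0 ≤ a → a ≤ A → 0 ≤ b → b ≤ Cb →
      pvGet2 (l.foldl (fun dp x =>
        (PySem.List.pyRange A (-1) (-1)).foldl
          (fun dp j => (PySem.List.pyRange Cb (-1) (-1)).foldl
            (fun dp k => pvCell x.1 x.2 (PySem.Int.floordiv x.1 2) dp j k) dp) dp) d) a b
      = pvSolve (m ++ l) a b) := by
  intro l
  induction l with
  | nil =>
    intro m d hd _ hm hinv a b ha haA hb hbC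
    simp only [List.foldl_nil, List.append_nil]
    exact hinv a b ha haA hb hbC
  | cons x l ih =>
    intro m d hd hl hm hinv a b ha haA hb hbC
    obtain ⟨p, t⟩ := x
    have hp : 0 ≤ p := hl (p, t) List.mem_cons_self
    have hl' : ∀ y ∈ l, 0 ≤ y.1 := fun y hy => hl y (List.mem_cons_of_mem _ hy)
    simp only [List.foldl_cons]
    obtain ⟨rd, rv⟩ := pvJpass hR hC hCb hp (fun a b => pvSolve m a b) ((A + 1).toNat) A
      (by omega) le_rfl d hd
      (fun a b ha hb haA hbC => hinv a b ha (by omega) hb hbC)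
      (fun a b haj haA hb hbC => absurd haj (by omega))
    have hinv' : ∀ a b, 0 ≤ a → a ≤ A → 0 ≤ b → b ≤ Cb →
        pvGet2 ((PySem.List.pyRange A (-1) (-1)).foldl
          (fun dp j => (PySem.List.pyRange Cb (-1) (-1)).foldl
            (fun dp k => pvCell p t (PySem.Int.floordiv p 2) dp j k) dp) d) a b
        = pvSolve (m ++ [(p, t)]) a b := by
      intro a b ha haA hb hbC
      rw [rv a b ha haA hb hbC, pvSolve_snoc m p t hm hp a b]
    have := ih (m ++ [(p, t)]) _ rd hl'
      (by
        intro y hy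
        rcases List.mem_append.mp hy with h | h
        · exact hm y h
        · simp at h; subst h; exact hp)
      hinv' a b ha haA hb hbC
    rwa [List.append_assoc, List.singleton_append] at this

theorem pvIndexZip {β : Type} (price tastiness : List Int) (h : price.length ≤ tastiness.length)
    (body : β → Int → Int → β) (d : β) :
    (PySem.List.pyRange 0 (price.length : Int) 1).foldl
      (fun dp i => body dp (PySem.List.pyGetD price i 0) (PySem.List.pyGetD tastiness i 0)) d
    = (price.zip tastiness).foldl (fun dp x => body dp x.1 x.2) d := by
  have hlen : (price.zip tastiness).length = price.length := by
    rw [List.length_zip]; omega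
  rw [show (price.length : Int) = ((price.zip tastiness).length : Int) by exact_mod_cast hlen.symm]
  rw [PySem.List.foldl_congr_mem (g := fun dp i =>
    (fun dp (x : Int × Int) => body dp x.1 x.2) dp (PySem.List.pyGetD (price.zip tastiness) i (0, 0)))]
  · exact PySem.List.foldl_pyRange_zero_pyGetD' (price.zip tastiness) (0, 0)
      (fun dp x => body dp x.1 x.2) d
  · intro dp i hi
    rw [PySem.List.mem_pyRange_one] at hi
    have hi2 : i.toNat < (price.zip tastiness).length := by omega
    have hip : i.toNat < price.length := by omega
    have hit : i.toNat < tastiness.length := by omega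
    rw [PySem.List.pyGetD_eq_getElem (price.zip tastiness) (0, 0) (by omega) (by exact_mod_cast hi.2),
      PySem.List.pyGetD_eq_getElem price 0 (by omega) (by omega),
      PySem.List.pyGetD_eq_getElem tastiness 0 (by omega) (by omega)]
    simp [List.getElem_zip]

theorem pvInit_dims (A Cb : Int) (hA : 0 ≤ A) :
    pvDims ((PySem.List.pyRange 0 (A + 1) 1).map
      (fun _ => List.replicate (Cb + 1).toNat (0 : Int))) (A + 1).toNat (Cb + 1).toNat := by
  constructor
  · rw [List.length_map, PySem.List.length_pyRange_one]
    omega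
  · intro r hr
    obtain ⟨_, _, rfl⟩ := List.mem_map.mp hr
    exact List.length_replicate

theorem pvInit_get (A Cb : Int) {a b : Int} (ha : 0 ≤ a) (haA : a ≤ A) (hb : 0 ≤ b)
    (hbC : b ≤ Cb) :
    pvGet2 ((PySem.List.pyRange 0 (A + 1) 1).map
      (fun _ => List.replicate (Cb + 1).toNat (0 : Int))) a b = 0 := by
  rw [pvGet2_nonneg _ ha hb]
  have hlen : ((PySem.List.pyRange 0 (A + 1) 1).map
      (fun _ => List.replicate (Cb + 1).toNat (0 : Int))).length = (A + 1).toNat := by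
    rw [List.length_map, PySem.List.length_pyRange_one]; omega
  rw [List.getD_eq_getElem _ [] (by omega), List.getElem_map]
  rw [List.getD_eq_getElem _ 0 (by rw [List.length_replicate]; omega)]
  exact List.getElem_replicate _

theorem maxTastiness_eq_alt (price tastiness : List Int) (maxAmount maxCoupons : Int)
    (hA : 0 ≤ maxAmount) (hC : 0 ≤ maxCoupons) (hlen : price.length ≤ tastiness.length)
    (hpos : ∀ p ∈ price, 0 ≤ p) :
    maxTastiness price tastiness maxAmount maxCoupons
      = maxTastiness_alt price tastiness maxAmount maxCoupons := by
  refine Eq.trans (congrArg (fun tbl => pvGet2 tbl maxAmount maxCoupons)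
    (pvIndexZip price tastiness hlen
      (fun dp p t =>
        (PySem.List.pyRange maxAmount (-1) (-1)).foldl (fun dp j =>
          (PySem.List.pyRange maxCoupons (-1) (-1)).foldl (fun dp k =>
            pvCell p t (PySem.Int.floordiv p 2) dp j k) dp) dp)
      ((PySem.List.pyRange 0 (maxAmount + 1) 1).map
        (fun _ => List.replicate (maxCoupons + 1).toNat (0 : Int))))) ?_
  have hzip : ∀ x ∈ price.zip tastiness, 0 ≤ x.1 := by
    intro x hx
    exact hpos x.1 (List.of_mem_zip hx).1
  have := pvItemfold (A := maxAmount) (Cb := maxCoupons) rfl rfl hA hC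
    (price.zip tastiness) [] _ (pvInit_dims maxAmount maxCoupons hA) hzip (by simp)
    (fun a b ha haA hb hbC => pvInit_get maxAmount maxCoupons ha haA hb hbC)
    maxAmount maxCoupons hA le_rfl hC le_rfl
  rw [List.nil_append] at this
  exact this

-- ===== VERDICT (by name: the statement is the Claim_ definition above) =====
theorem maxTastiness_spec : Claim_equal_maxTastiness := by
  intro price tastiness maxAmount maxCoupons _ hpre
  obtain ⟨hA, hC, hlen, hpos⟩ := hpre
  show maxTastiness price tastiness maxAmount maxCoupons
      = maxTastiness_alt price tastiness maxAmount maxCoupons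
  exact maxTastiness_eq_alt price tastiness maxAmount maxCoupons hA hC hlen hpos
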